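-- pv_equiv track=rewrite | github.com/AllisonH12/thermocas9 | scripts/annotate_top_hits.py | annotate_gene
-- ===== SOURCE A (Python) =====
-- import bisect
--
-- PROMOTER_BP = 1000
--
-- def _tss(strand: str, tx_start: int, tx_end: int) -> int:
--     return tx_start if strand == "+" else tx_end - 1
--
-- def annotate_gene(
--     chrom: str, pos: int, tx_list: list[tuple]
-- ) -> tuple[str, int, str]:
--     """Return (nearest_gene, tss_distance_bp, feature_class).
--
--     `tss_distance_bp` is positive when the candidate lies on the upstream
--     (promoter) side of the TSS with respect to the gene's strand, i.e.
--     standard regulatory-biology convention.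
--     """
--
--     if not tx_list:
--         return ("", 0, "intergenic")
--
--     # Collect overlapping transcripts. UCSC genePred intervals are 0-indexed
--     # half-open: a tx at [tx_start, tx_end) covers `pos` iff
--     # tx_start <= pos < tx_end. Earlier failures of this function treated
--     # pos == tx_end as still inside, pulling boundary loci into gene_body.
--     #
--     # Do NOT early-break on tx_end. The list is sorted by tx_start, not tx_end,
--     # so a short later-starting transcript can end before `pos` while an
--     # earlier-starting long transcript still overlaps. We have to scan every
--     # transcript whose start is <= pos.
--     starts = [t[0] for t in tx_list]
--     idx = bisect.bisect_right(starts, pos) - 1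
--     overlapping: list[tuple] = []
--     j = idx
--     while j >= 0:
--         if tx_list[j][0] <= pos < tx_list[j][1]:
--             overlapping.append(tx_list[j])
--         j -= 1
--
--     # Compute the candidate's best match: prefer overlapping, then nearest
--     # by TSS distance. Ties broken by tx length (prefer compact isoform)
--     # then by gene symbol for determinism.
--
--     def _tss_distance(tx: tuple) -> tuple[int, int]:
--         tx_start, tx_end, strand, _ = tx
--         tss = _tss(strand, tx_start, tx_end)
--         # upstream-positive convention:
--         if strand == "+":
--             signed = tss - pos
--         else:
--             signed = pos - tss
--         return abs(signed), signed
--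
--     if overlapping:
--         chosen = min(
--             overlapping,
--             key=lambda t: (_tss_distance(t)[0], t[1] - t[0], t[3]),
--         )
--     else:
--         # nearest by TSS across all transcripts on the chrom
--         chosen = min(tx_list, key=lambda t: (_tss_distance(t)[0], t[1] - t[0], t[3]))
--
--     tx_start, tx_end, strand, gene = chosen
--     abs_d, signed_d = _tss_distance(chosen)
--
--     # Feature class
--     if chosen in overlapping:
--         if abs_d <= PROMOTER_BP:
--             feat = "promoter"  # TSS-adjacent
--         else:
--             feat = "gene_body"
--     else:
--         if abs_d <= PROMOTER_BP:
--             feat = "promoter"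
--         else:
--             feat = "intergenic"
--
--     return (gene, signed_d, feat)
-- ===== SOURCE B (Python) =====
-- PROMOTER_BP = 1000
--
--
-- def annotate_gene(chrom, pos, tx_list):
--     """Single forward pass: track the best overlapping and the best overall
--     transcript by the key (abs TSS distance, length, gene); no bisect, no
--     intermediate lists."""
--     if not tx_list:
--         return ("", 0, "intergenic")
--     best_ov = None  # (key, tx) among transcripts with tx_start <= pos < tx_end
--     best_any = None  # (key, tx) among all transcripts
--     for t in tx_list:
--         tx_start, tx_end, strand, gene = t
--         tss = tx_start if strand == "+" else tx_end - 1
--         signed = tss - pos if strand == "+" else pos - tss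
--         key = (abs(signed), tx_end - tx_start, gene)
--         if best_any is None or key < best_any[0]:
--             best_any = (key, t)
--         if tx_start <= pos < tx_end and (best_ov is None or key < best_ov[0]):
--             best_ov = (key, t)
--     if best_ov is not None:
--         chosen, overlapped = best_ov[1], True
--     else:
--         chosen, overlapped = best_any[1], False
--     tx_start, tx_end, strand, gene = chosen
--     tss = tx_start if strand == "+" else tx_end - 1
--     signed = tss - pos if strand == "+" else pos - tss
--     if abs(signed) <= PROMOTER_BP:
--         feat = "promoter"
--     elif overlapped:
--         feat = "gene_body"
--     else:
--         feat = "intergenic"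
--     return (gene, signed, feat)
-- ===== Notes on version B (the rewrite author's own statement) =====
-- stated objective: simpler
-- what changed: Replaces A's bisect index + backward while-loop building an 'overlapping' list + two min(key=...) calls with one forward fold that keeps two running bests (best overlapping, best overall) under the same (abs TSS distance, length, gene) key, then classifies once.
import Mathlib
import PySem

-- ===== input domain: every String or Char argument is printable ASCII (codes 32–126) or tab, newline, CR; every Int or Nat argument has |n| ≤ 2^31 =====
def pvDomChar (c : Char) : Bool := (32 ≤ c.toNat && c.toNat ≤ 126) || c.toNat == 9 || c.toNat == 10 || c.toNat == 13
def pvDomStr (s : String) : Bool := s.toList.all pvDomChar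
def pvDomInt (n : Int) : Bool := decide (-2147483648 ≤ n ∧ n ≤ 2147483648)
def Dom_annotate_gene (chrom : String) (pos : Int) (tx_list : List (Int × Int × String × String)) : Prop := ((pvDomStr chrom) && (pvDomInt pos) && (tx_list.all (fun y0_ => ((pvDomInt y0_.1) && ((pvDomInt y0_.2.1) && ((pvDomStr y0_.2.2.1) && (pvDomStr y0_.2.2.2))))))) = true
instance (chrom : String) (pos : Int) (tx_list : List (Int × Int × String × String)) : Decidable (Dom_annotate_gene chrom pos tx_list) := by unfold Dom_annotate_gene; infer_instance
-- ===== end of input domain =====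

-- B replaces A's bisect + backward overlap scan + two min(key=...) passes by one forward fold keeping
-- two running bests (objective: simpler); return values only, neither program mutates its arguments.

-- ===== PORT A =====
-- _tss helper of A
def pvTss (strand : String) (tx_start tx_end : Int) : Int :=
  if strand = "+" then tx_start else tx_end - 1

-- A's inner _tss_distance: returns (abs(signed), signed)
def pvTdistA (pos : Int) (t : Int × Int × String × String) : Int × Int :=
  let tss := pvTss t.2.2.1 t.1 t.2.1
  let signed := if t.2.2.1 = "+" then tss - pos else pos - tss
  (|signed|, signed)

-- A's min(..., key=lambda t: (_tss_distance(t)[0], t[1]-t[0], t[3])): Python tuple order = lexicographic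
def pvKeyA (pos : Int) (t : Int × Int × String × String) : Int ×ₗ Int ×ₗ String :=
  toLex ((pvTdistA pos t).1, toLex (t.2.1 - t.1, t.2.2.2))

-- A's 'while j >= 0' loop collecting overlapping transcripts (append, then j -= 1)
def pvOvLoop (txl : List (Int × Int × String × String)) (pos : Int) (j : Int)
    (acc : List (Int × Int × String × String)) : List (Int × Int × String × String) :=
  if h : 0 ≤ j then
    let t := txl.getD j.toNat (0, 0, "", "")
    pvOvLoop txl pos (j - 1) (if t.1 ≤ pos ∧ pos < t.2.1 then acc ++ [t] else acc)
  else acc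
termination_by (j + 1).toNat
decreasing_by omega

def annotate_gene (chrom : String) (pos : Int) (tx_list : List (Int × Int × String × String)) : String × Int × String :=
  if tx_list = [] then ("", 0, "intergenic")
  else
    let starts := tx_list.map (fun t => t.1)
    let idx : Int := (PySem.List.bisectRight starts pos : Int) - 1
    let overlapping := pvOvLoop tx_list pos idx []
    -- Python's min raises on []; both calls are guarded (overlapping ≠ [] resp. tx_list ≠ []), so getD is unreachable
    let chosen :=
      if overlapping ≠ [] then (PySem.List.min? overlapping (pvKeyA pos)).getD (0, 0, "", "")
      else (PySem.List.min? tx_list (pvKeyA pos)).getD (0, 0, "", "")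
    let gene := chosen.2.2.2
    let d := pvTdistA pos chosen
    let feat :=
      if overlapping.contains chosen then
        if d.1 ≤ 1000 then "promoter" else "gene_body"
      else
        if d.1 ≤ 1000 then "promoter" else "intergenic"
    (gene, d.2, feat)

-- ===== PORT B =====
-- B's key (abs(signed), tx_end - tx_start, gene)
def pvKeyB (pos : Int) (t : Int × Int × String × String) : Int × Int × String :=
  let tss := if t.2.2.1 = "+" then t.1 else t.2.1 - 1
  let signed := if t.2.2.1 = "+" then tss - pos else pos - tss
  (|signed|, t.2.1 - t.1, t.2.2.2)

-- Python's '<' on (int, int, str) tuples, lexicographic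
def pvKeyLt (a b : Int × Int × String) : Bool :=
  decide (a.1 < b.1) || (decide (a.1 = b.1) &&
    (decide (a.2.1 < b.2.1) || (decide (a.2.1 = b.2.1) && decide (a.2.2 < b.2.2))))

-- 'best is None or key < best[0]' update
def pvBetter (k : Int × Int × String) (t : Int × Int × String × String)
    (best : Option ((Int × Int × String) × (Int × Int × String × String))) :
    Option ((Int × Int × String) × (Int × Int × String × String)) :=
  match best with
  | none => some (k, t)
  | some (bk, bt) => if pvKeyLt k bk then some (k, t) else some (bk, bt)

-- one iteration of B's for-loop: state = (best_ov, best_any)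
def pvStep (pos : Int)
    (st : Option ((Int × Int × String) × (Int × Int × String × String)) ×
          Option ((Int × Int × String) × (Int × Int × String × String)))
    (t : Int × Int × String × String) :
    Option ((Int × Int × String) × (Int × Int × String × String)) ×
    Option ((Int × Int × String) × (Int × Int × String × String)) :=
  let k := pvKeyB pos t
  let any' := pvBetter k t st.2
  let ov' := if t.1 ≤ pos ∧ pos < t.2.1 then pvBetter k t st.1 else st.1
  (ov', any')

def annotate_gene_alt (chrom : String) (pos : Int) (tx_list : List (Int × Int × String × String)) : String × Int × String :=
  if tx_list = [] then ("", 0, "intergenic")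
  else
    let r := tx_list.foldl (pvStep pos) (none, none)
    let co :=
      match r.1 with
      | some kt => (kt.2, true)
      | none => ((r.2.map (fun (kt : (Int × Int × String) × (Int × Int × String × String)) => kt.2)).getD (0, 0, "", ""), false)
    let chosen := co.1
    let tss := if chosen.2.2.1 = "+" then chosen.1 else chosen.2.1 - 1
    let signed := if chosen.2.2.1 = "+" then tss - pos else pos - tss
    let feat :=
      if |signed| ≤ 1000 then "promoter"
      else if co.2 then "gene_body" else "intergenic"
    (chosen.2.2.2, signed, feat)

-- ===== PRECONDITION & SPEC =====
-- Pre_ excludes tx_lists that are unsorted by tx_start AND contain an overlapping transcript AND some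
-- tx_start > pos: there A's bisect cut (whose sortedness assumption A's own comment states: "The list is
-- sorted by tx_start") can accidentally drop overlapping transcripts; kept inside are all sorted lists,
-- and unsorted ones where the cut provably cannot matter (no overlap at all, or every tx_start ≤ pos).
def Pre_annotate_gene (chrom : String) (pos : Int) (tx_list : List (Int × Int × String × String)) : Prop :=
  List.Pairwise (fun a b => a ≤ b) (tx_list.map (fun t => t.1)) ∨
    (∀ t ∈ tx_list, ¬(t.1 ≤ pos ∧ pos < t.2.1)) ∨
    (∀ t ∈ tx_list, t.1 ≤ pos)
instance (chrom : String) (pos : Int) (tx_list : List (Int × Int × String × String)) : Decidable (Pre_annotate_gene chrom pos tx_list) := by unfold Pre_annotate_gene; infer_instance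

def pvWitness_annotate_gene : String × Int × (List (Int × Int × String × String)) :=
  ("chr1", 5, [(0, 10, "+", "g"), (20, 30, "-", "h")])

def Spec_annotate_gene (chrom : String) (pos : Int) (tx_list : List (Int × Int × String × String)) (out : String × Int × String) : Prop := out = annotate_gene_alt chrom pos tx_list
instance (chrom : String) (pos : Int) (tx_list : List (Int × Int × String × String)) (out : String × Int × String) : Decidable (Spec_annotate_gene chrom pos tx_list out) := by unfold Spec_annotate_gene; infer_instance

-- ===== CLAIM (what is proved, stated in full; the proofs are below) =====
def Claim_equal_annotate_gene : Prop := ∀ (chrom : String) (pos : Int) (tx_list : List (Int × Int × String × String)), Dom_annotate_gene chrom pos tx_list → Pre_annotate_gene chrom pos tx_list → Spec_annotate_gene chrom pos tx_list (annotate_gene chrom pos tx_list)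


-- ===== LEMMAS AND PROOFS =====

-- the overlap predicate 'tx_start <= pos < tx_end'
def pvOv (pos : Int) (t : Int × Int × String × String) : Bool :=
  decide (t.1 ≤ pos ∧ pos < t.2.1)

-- pack a plain (Int, Int, String) triple as the lexicographic key type A's min? uses
def pvLex3 (k : Int × Int × String) : Int ×ₗ Int ×ₗ String :=
  toLex (k.1, toLex (k.2.1, k.2.2))

theorem pvKeyLt_iff (a b : Int × Int × String) :
    pvKeyLt a b = true ↔ pvLex3 a < pvLex3 b := by
  simp [pvKeyLt, pvLex3, Prod.Lex.toLex_lt_toLex]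

theorem pvKeyA_eq (pos : Int) (t : Int × Int × String × String) :
    pvKeyA pos t = pvLex3 (pvKeyB pos t) := rfl

theorem pvLex3_inj {a b : Int × Int × String} (h : pvLex3 a = pvLex3 b) : a = b := by
  rw [Prod.ext_iff]
  simpa [pvLex3] using h

-- B's fold splits into the overlap-best fold (over the filtered list) and the overall-best fold
theorem pvFoldl_split (pos : Int) (l : List (Int × Int × String × String))
    (st : Option ((Int × Int × String) × (Int × Int × String × String)) ×
          Option ((Int × Int × String) × (Int × Int × String × String))) :
    l.foldl (pvStep pos) st =
      ((l.filter (pvOv pos)).foldl (fun b t => pvBetter (pvKeyB pos t) t b) st.1,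
       l.foldl (fun b t => pvBetter (pvKeyB pos t) t b) st.2) := by
  induction l generalizing st with
  | nil => rfl
  | cons t l ih =>
    by_cases hp : t.1 ≤ pos ∧ pos < t.2.1 <;>
      simp [List.filter_cons, pvOv, hp, pvStep, ih]

-- the running-best fold computes Python's min(..., key=...) (first minimal element)
theorem pvBetterFold_eq (pos : Int) (l : List (Int × Int × String × String))
    (o : Option (Int × Int × String × String)) :
    l.foldl (fun b t => pvBetter (pvKeyB pos t) t b) (o.map fun t => (pvKeyB pos t, t)) =
      (PySem.List.min? (o.toList ++ l) (pvKeyA pos)).map (fun t => (pvKeyB pos t, t)) := by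
  induction l generalizing o with
  | nil =>
    cases o with
    | none => rfl
    | some m => simp [PySem.List.min?]
  | cons x l ih =>
    cases o with
    | none =>
      have := ih (some x)
      simpa [PySem.List.min?, pvBetter] using this
    | some m =>
      by_cases h : pvKeyA pos x < pvKeyA pos m
      · have hb : pvKeyLt (pvKeyB pos x) (pvKeyB pos m) = true :=
          (pvKeyLt_iff _ _).2 (by rwa [← pvKeyA_eq, ← pvKeyA_eq])
        have := ih (some x)
        simp only [Option.toList_some, List.singleton_append, List.foldl_cons,
          Option.map_some] at this ⊢
        rw [show pvBetter (pvKeyB pos x) x (some (pvKeyB pos m, m)) = some (pvKeyB pos x, x) by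
          simp [pvBetter, hb]]
        rw [this]
        congr 1
        simp [PySem.List.min?, h]
      · have hb : pvKeyLt (pvKeyB pos x) (pvKeyB pos m) = false := by
          rw [Bool.eq_false_iff]
          intro hc
          exact h (by rw [pvKeyA_eq, pvKeyA_eq]; exact (pvKeyLt_iff _ _).1 hc)
        have := ih (some m)
        simp only [Option.toList_some, List.singleton_append, List.foldl_cons,
          Option.map_some] at this ⊢
        rw [show pvBetter (pvKeyB pos x) x (some (pvKeyB pos m, m)) = some (pvKeyB pos m, m) by
          simp [pvBetter, hb]]
        rw [this]
        congr 1
        simp [PySem.List.min?, h]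

theorem pvBetterFold_none (pos : Int) (l : List (Int × Int × String × String)) :
    l.foldl (fun b t => pvBetter (pvKeyB pos t) t b) none =
      (PySem.List.min? l (pvKeyA pos)).map (fun t => (pvKeyB pos t, t)) := by
  simpa using pvBetterFold_eq pos l none

-- A's backward while-loop collects the overlapping transcripts of the (j+1)-prefix, in reverse
theorem pvOvLoop_eq (txl : List (Int × Int × String × String)) (pos : Int) (j : Int)
    (acc : List (Int × Int × String × String)) (hj : (j + 1).toNat ≤ txl.length) :
    pvOvLoop txl pos j acc =
      acc ++ ((txl.take (j + 1).toNat).filter (pvOv pos)).reverse := by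
  fun_induction pvOvLoop txl pos j acc with
  | case1 j acc h t ih =>
    have hjlt : j.toNat < txl.length := by omega
    have hsucc : (j + 1).toNat = j.toNat + 1 := by omega
    have hgetD : t = txl[j.toNat] := by
      simp only [t, List.getD_eq_getElem?_getD, List.getElem?_eq_getElem hjlt,
        Option.getD_some]
    have htake : txl.take ((j + 1).toNat) = txl.take j.toNat ++ [txl[j.toNat]] := by
      rw [hsucc, List.take_add_one, List.getElem?_eq_getElem hjlt]
      rfl
    simp only [dite_eq_ite] at ih
    rw [ih (by omega)]
    rw [htake, List.filter_append, List.reverse_append]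
    have hone : ((j - 1) + 1).toNat = j.toNat := by omega
    rw [hone]
    by_cases hp : t.1 ≤ pos ∧ pos < t.2.1
    · rw [if_pos hp]
      have : [txl[j.toNat]].filter (pvOv pos) = [txl[j.toNat]] := by
        simp [pvOv, List.filter_cons, ← hgetD, hp]
      rw [this]
      simp [hgetD]
    · rw [if_neg hp]
      have : [txl[j.toNat]].filter (pvOv pos) = [] := by
        simp [pvOv, List.filter_cons, ← hgetD, hp]
      rw [this]
      simp [hgetD]
  | case2 j acc h =>
    have : (j + 1).toNat = 0 := by omega
    simp [this]

-- on a start-sorted list, the bisect prefix contains every overlapping transcript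
theorem pvFilter_take_bisect (pos : Int) (txl : List (Int × Int × String × String))
    (hs : List.Pairwise (fun a b => a ≤ b) (txl.map (fun t => t.1))) :
    (txl.take (PySem.List.bisectRight (txl.map (fun t => t.1)) pos)).filter (pvOv pos) =
      txl.filter (pvOv pos) := by
  obtain ⟨hle, -, hgt⟩ := PySem.List.bisectRight_spec (txl.map (fun t => t.1)) pos hs
  conv_rhs => rw [← List.take_append_drop (PySem.List.bisectRight (txl.map (fun t => t.1)) pos) txl]
  rw [List.filter_append]
  have hdrop : (txl.drop (PySem.List.bisectRight (txl.map (fun t => t.1)) pos)).filter (pvOv pos) = [] := by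
    rw [List.filter_eq_nil_iff]
    intro t ht
    obtain ⟨i, hi, hti⟩ := List.mem_iff_getElem.1 ht
    have hlen : (txl.map (fun t => t.1)).length = txl.length := by simp
    have hib : PySem.List.bisectRight (txl.map (fun t => t.1)) pos + i < txl.length := by
      have h1 : i < txl.length - PySem.List.bisectRight (txl.map (fun t => t.1)) pos := by
        simpa using hi
      have h2 : PySem.List.bisectRight (txl.map (fun t => t.1)) pos ≤ txl.length := by
        simpa using hle
      omega
    have hgi : pos < txl[PySem.List.bisectRight (txl.map (fun t => t.1)) pos + i].1 := by
      have := hgt (PySem.List.bisectRight (txl.map (fun t => t.1)) pos + i)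
        (by omega) (by omega)
      simpa using this
    have : t = txl[PySem.List.bisectRight (txl.map (fun t => t.1)) pos + i] := by
      rw [← hti, List.getElem_drop]
    subst this
    simp [pvOv]
    omega
  rw [hdrop, List.append_nil]

-- an overlapping transcript lies downstream of (or at) its TSS: signed = -abs
theorem pvSigned_of_overlap (pos : Int) (t : Int × Int × String × String)
    (hp : t.1 ≤ pos ∧ pos < t.2.1) :
    (pvTdistA pos t).2 = -(pvTdistA pos t).1 := by
  simp only [pvTdistA, pvTss]
  by_cases hstr : t.2.2.1 = "+" <;>
    simp only [hstr, if_pos, if_neg, if_true, if_false, reduceIte] <;>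
    rw [abs_of_nonpos (by omega)] <;> ring

-- membership gives List.contains (used for A's `chosen in overlapping` test)
theorem pvContains_of_mem {l : List (Int × Int × String × String)}
    {t : Int × Int × String × String} (h : t ∈ l) : l.contains t = true := by
  simpa using h

-- the bisect index never exceeds the list length (no sortedness needed)
theorem pvBisectLoop_le (xs : List Int) (x : Int) (fuel : Nat) :
    ∀ (lo hi : Nat), lo ≤ hi → hi ≤ xs.length →
      PySem.List.bisectRightLoop xs x fuel lo hi ≤ xs.length := by
  induction fuel with
  | zero => intro lo hi h1 h2; simpa [PySem.List.bisectRightLoop] using le_trans h1 h2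
  | succ fuel ih =>
    intro lo hi h1 h2
    rw [PySem.List.bisectRightLoop]
    by_cases hlt : lo < hi
    · rw [if_pos hlt]
      rcases hy : xs[(lo + hi) / 2]? with _ | y
      · exact le_trans h1 h2
      · show (if x < y then PySem.List.bisectRightLoop xs x fuel lo ((lo + hi) / 2)
            else PySem.List.bisectRightLoop xs x fuel ((lo + hi) / 2 + 1) hi) ≤ xs.length
        by_cases hx : x < y
        · rw [if_pos hx]
          exact ih lo ((lo + hi) / 2) (by omega) (by omega)
        · rw [if_neg hx]
          exact ih ((lo + hi) / 2 + 1) hi (by omega) h2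
    · rw [if_neg hlt]; omega

-- when every element is ≤ x, bisect_right lands at the end of the list (sorted or not)
theorem pvBisectLoop_all (xs : List Int) (x : Int) (hall : ∀ e ∈ xs, e ≤ x) (fuel : Nat) :
    ∀ (lo : Nat), xs.length ≤ fuel + lo → lo ≤ xs.length →
      PySem.List.bisectRightLoop xs x fuel lo xs.length = xs.length := by
  induction fuel with
  | zero => intro lo h1 h2; simp [PySem.List.bisectRightLoop]; omega
  | succ fuel ih =>
    intro lo h1 h2
    rw [PySem.List.bisectRightLoop]
    by_cases hlt : lo < xs.length
    · rw [if_pos hlt]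
      have hm : (lo + xs.length) / 2 < xs.length := by omega
      rw [List.getElem?_eq_getElem hm]
      have hx : ¬ x < xs[(lo + xs.length) / 2] := by
        have := hall _ (List.getElem_mem hm)
        omega
      show (if x < xs[(lo + xs.length) / 2] then
            PySem.List.bisectRightLoop xs x fuel lo ((lo + xs.length) / 2)
          else PySem.List.bisectRightLoop xs x fuel ((lo + xs.length) / 2 + 1) xs.length) =
          xs.length
      rw [if_neg hx]
      exact ih ((lo + xs.length) / 2 + 1) (by omega) (by omega)
    · rw [if_neg hlt]; omega

-- A's overlap loop yields the reversed full overlap filter: case 1, sorted list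
theorem pvReq_sorted (pos : Int) (txl : List (Int × Int × String × String))
    (hs : List.Pairwise (fun a b => a ≤ b) (txl.map (fun t => t.1))) :
    pvOvLoop txl pos ((PySem.List.bisectRight (txl.map (fun t => t.1)) pos : Int) - 1) [] =
      (txl.filter (pvOv pos)).reverse := by
  have hle := (PySem.List.bisectRight_spec (txl.map (fun t => t.1)) pos hs).1
  have h1 : (((PySem.List.bisectRight (txl.map (fun t => t.1)) pos : Int) - 1) + 1).toNat =
      PySem.List.bisectRight (txl.map (fun t => t.1)) pos := by omega
  rw [pvOvLoop_eq _ _ _ _ (by rw [h1]; simpa using hle), h1,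
    pvFilter_take_bisect pos txl hs]
  simp

-- case 2: no transcript overlaps pos, so whatever prefix the bisect cut keeps filters to []
theorem pvReq_noov (pos : Int) (txl : List (Int × Int × String × String))
    (hno : ∀ t ∈ txl, ¬(t.1 ≤ pos ∧ pos < t.2.1)) :
    pvOvLoop txl pos ((PySem.List.bisectRight (txl.map (fun t => t.1)) pos : Int) - 1) [] =
      (txl.filter (pvOv pos)).reverse := by
  have hle : PySem.List.bisectRight (txl.map (fun t => t.1)) pos ≤ txl.length := by
    have := pvBisectLoop_le (txl.map (fun t => t.1)) pos
      (txl.map (fun t => t.1)).length 0 (txl.map (fun t => t.1)).length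
      (Nat.zero_le _) le_rfl
    simpa [PySem.List.bisectRight] using this
  have hfe : txl.filter (pvOv pos) = [] :=
    List.filter_eq_nil_iff.2 (fun t ht => by simpa [pvOv] using hno t ht)
  have h1 : (((PySem.List.bisectRight (txl.map (fun t => t.1)) pos : Int) - 1) + 1).toNat =
      PySem.List.bisectRight (txl.map (fun t => t.1)) pos := by omega
  rw [pvOvLoop_eq _ _ _ _ (by rw [h1]; exact hle), h1]
  have hpre : (txl.take (PySem.List.bisectRight (txl.map (fun t => t.1)) pos)).filter (pvOv pos) = [] :=
    List.filter_eq_nil_iff.2 (fun t ht => by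
      simpa [pvOv] using hno t (List.mem_of_mem_take ht))
  rw [hpre, hfe]
  simp

-- case 3: every tx_start ≤ pos, so the bisect cut keeps the whole list
theorem pvReq_all (pos : Int) (txl : List (Int × Int × String × String))
    (hall : ∀ t ∈ txl, t.1 ≤ pos) :
    pvOvLoop txl pos ((PySem.List.bisectRight (txl.map (fun t => t.1)) pos : Int) - 1) [] =
      (txl.filter (pvOv pos)).reverse := by
  have hr : PySem.List.bisectRight (txl.map (fun t => t.1)) pos = txl.length := by
    have := pvBisectLoop_all (txl.map (fun t => t.1)) pos
      (by intro e he; obtain ⟨t, ht, rfl⟩ := List.mem_map.1 he; exact hall t ht)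
      (txl.map (fun t => t.1)).length 0 (by omega) (Nat.zero_le _)
    simpa [PySem.List.bisectRight] using this
  have h1 : (((PySem.List.bisectRight (txl.map (fun t => t.1)) pos : Int) - 1) + 1).toNat =
      PySem.List.bisectRight (txl.map (fun t => t.1)) pos := by omega
  rw [pvOvLoop_eq _ _ _ _ (by rw [h1, hr]), h1, hr, List.take_length]
  simp

-- common core: with the overlap loop characterised, A's two min() branches match B's two running bests
theorem pvCore (chrom : String) (pos : Int) (txl : List (Int × Int × String × String))
    (hnil : txl ≠ [])
    (hreq : pvOvLoop txl pos ((PySem.List.bisectRight (txl.map (fun t => t.1)) pos : Int) - 1) [] =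
      (txl.filter (pvOv pos)).reverse) :
    annotate_gene chrom pos txl = annotate_gene_alt chrom pos txl := by
  have hsplit : txl.foldl (pvStep pos) (none, none) =
      ((txl.filter (pvOv pos)).foldl (fun b t => pvBetter (pvKeyB pos t) t b) none,
       txl.foldl (fun b t => pvBetter (pvKeyB pos t) t b) none) :=
    pvFoldl_split pos txl (none, none)
  simp only [annotate_gene, annotate_gene_alt, if_neg hnil, hreq, hsplit,
    pvBetterFold_none]
  rcases hm : PySem.List.min? (txl.filter (pvOv pos)) (pvKeyA pos) with _ | mB
  · -- no overlapping transcript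
    have hov0 : txl.filter (pvOv pos) = [] := (PySem.List.min?_eq_none_iff _ _).1 hm
    rcases hma : PySem.List.min? txl (pvKeyA pos) with _ | m
    · exact absurd ((PySem.List.min?_eq_none_iff _ _).1 hma) hnil
    · simp [hov0, hma, pvTdistA, pvTss]
  · -- some transcript overlaps
    have hovne : (txl.filter (pvOv pos)).reverse ≠ [] := by
      intro hc
      rw [List.reverse_eq_nil_iff] at hc
      rw [hc] at hm
      simp [PySem.List.min?] at hm
    rcases hmA : PySem.List.min? (txl.filter (pvOv pos)).reverse (pvKeyA pos) with _ | mA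
    · exact absurd ((PySem.List.min?_eq_none_iff _ _).1 hmA) hovne
    · have hmemA : mA ∈ (txl.filter (pvOv pos)).reverse := PySem.List.min?_mem hmA
      have hmemB : mB ∈ txl.filter (pvOv pos) := PySem.List.min?_mem hm
      have hkeyeq : pvKeyA pos mA = pvKeyA pos mB :=
        le_antisymm (PySem.List.min?_isMin hmA mB (List.mem_reverse.2 hmemB))
          (PySem.List.min?_isMin hm mA (List.mem_reverse.1 hmemA))
      have hkB : pvKeyB pos mA = pvKeyB pos mB :=
        pvLex3_inj (by rw [← pvKeyA_eq, ← pvKeyA_eq, hkeyeq])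
      have hpA : mA.1 ≤ pos ∧ pos < mA.2.1 := by
        have := List.of_mem_filter (List.mem_reverse.1 hmemA)
        simpa [pvOv] using this
      have hpB : mB.1 ≤ pos ∧ pos < mB.2.1 := by
        have := List.of_mem_filter hmemB
        simpa [pvOv] using this
      have habs : (pvTdistA pos mA).1 = (pvTdistA pos mB).1 := by
        have := congrArg (fun k => k.1) hkB
        simpa [pvKeyB, pvTdistA, pvTss] using this
      have hgene : mA.2.2.2 = mB.2.2.2 := by
        have := congrArg (fun k => k.2.2) hkB
        simpa [pvKeyB] using this
      have hsigned : (pvTdistA pos mA).2 = (pvTdistA pos mB).2 := by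
        rw [pvSigned_of_overlap pos mA hpA, pvSigned_of_overlap pos mB hpB, habs]
      have hcont : ((txl.filter (pvOv pos)).reverse).contains mA = true :=
        pvContains_of_mem hmemA
      simp only [if_neg (by exact hovne), hmA, hm, hovne, ne_eq, not_false_iff,
        if_true, Option.getD_some, Option.map_some, hcont]
      simp only [pvTdistA, pvTss] at hsigned ⊢
      rw [hgene, hsigned]

-- ===== VERDICT (by name: the statement is the Claim_ definition above) =====
theorem annotate_gene_spec : Claim_equal_annotate_gene := by
  intro chrom pos txl _ hpre
  unfold Pre_annotate_gene at hpre
  show annotate_gene chrom pos txl = annotate_gene_alt chrom pos txl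
  by_cases hnil : txl = []
  · subst hnil; rfl
  · refine pvCore chrom pos txl hnil ?_
    rcases hpre with hs | hno | hall
    · exact pvReq_sorted pos txl hs
    · exact pvReq_noov pos txl hno
    · exact pvReq_all pos txl hall
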